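-- pv_equiv track=rewrite | github.com/SauravSinha76/scaler2 | class8/amazing_substring.py | solve
-- ===== SOURCE A (Python) =====
-- def solve(A):
--     vowels = "AEIOU"
--     A =A.upper()
--     n = len(A)
--     ans =0
--     c = 0
--     for i in range(n-1,-1,-1):
--         c += 1
--         if A[i] in vowels:
--             ans += c
--     return ans % 1003
-- ===== SOURCE B (Python) =====
-- def solve(A):
--     vowels = set("AEIOU")
--     ans = 0
--     vcount = 0
--     for ch in A.upper():
--         if ch in vowels:
--             vcount += 1
--         ans += vcount
--     return ans % 1003
-- ===== Notes on version B (the rewrite author's own statement) =====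
-- stated objective: alternative
-- what changed: A scans the string in reverse adding a distance weight at each vowel; B scans forward keeping a running prefix count of vowels and adds that count at every position.
import Mathlib
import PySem

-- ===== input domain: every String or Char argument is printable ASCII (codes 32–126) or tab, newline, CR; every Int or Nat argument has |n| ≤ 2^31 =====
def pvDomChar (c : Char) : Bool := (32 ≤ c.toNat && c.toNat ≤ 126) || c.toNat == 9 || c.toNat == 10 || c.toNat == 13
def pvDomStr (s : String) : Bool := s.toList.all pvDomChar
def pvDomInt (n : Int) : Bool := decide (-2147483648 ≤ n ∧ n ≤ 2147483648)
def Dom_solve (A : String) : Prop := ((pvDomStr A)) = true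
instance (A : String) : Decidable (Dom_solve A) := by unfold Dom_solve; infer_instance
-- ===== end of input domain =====

-- B replaces A's reverse scan (distance weight added at each vowel) by a forward scan that
-- adds a running prefix vowel count at every position; same O(n) cost, different decomposition.

-- ===== PORT A =====
def solve (A : String) : Int :=
  let vowels := "AEIOU"
  let up := PySem.Chars.upper A.toList
  let n := up.length
  let r := (PySem.List.pyRange ((n : Int) - 1) (-1) (-1)).foldl
    (fun (s : Int × Int) i =>
      let c := s.2 + 1
      let ans := if vowels.toList.contains (PySem.List.pyGetD up i ' ') then s.1 + c else s.1
      (ans, c)) (0, 0)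
  PySem.Int.mod r.1 1003

-- ===== PORT B =====
def solve_alt (A : String) : Int :=
  let vowels : PySem.Set Char := PySem.Set.ofList "AEIOU".toList
  let r := (PySem.Chars.upper A.toList).foldl
    (fun (s : Int × Int) ch =>
      let v := if PySem.Set.contains vowels ch then s.2 + 1 else s.2
      (s.1 + v, v)) (0, 0)
  PySem.Int.mod r.1 1003

-- ===== PRECONDITION & SPEC =====
def Spec_solve (A : String) (out : Int) : Prop := out = solve_alt A
instance (A : String) (out : Int) : Decidable (Spec_solve A out) := by unfold Spec_solve; infer_instance

-- ===== CLAIM (what is proved, stated in full; the proofs are below) =====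
def Claim_equal_solve : Prop := ∀ (A : String), Dom_solve A → Spec_solve A (solve A)

-- ===== LEMMAS AND PROOFS =====
def isVowel (ch : Char) : Bool := "AEIOU".toList.contains ch

def sA : List Char → Int → Int
  | [], _ => 0
  | ch :: t, c => (if isVowel ch then c + 1 else 0) + sA t (c + 1)

def sB : List Char → Int → Int
  | [], _ => 0
  | ch :: t, v => (if isVowel ch then v + 1 else v) + sB t (if isVowel ch then v + 1 else v)

lemma foldA (l : List Char) (a c : Int) :
    l.foldl (fun (s : Int × Int) ch =>
      (if isVowel ch then s.1 + (s.2 + 1) else s.1, s.2 + 1)) (a, c)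
    = (a + sA l c, c + l.length) := by
  induction l generalizing a c with
  | nil => simp [sA]
  | cons ch t ih =>
    simp only [List.foldl_cons, sA, ih, List.length_cons, Prod.mk.injEq]
    split_ifs <;> refine ⟨?_, ?_⟩ <;> push_cast <;> ring

lemma foldB (l : List Char) (a v : Int) :
    l.foldl (fun (s : Int × Int) ch =>
      (s.1 + (if isVowel ch then s.2 + 1 else s.2), if isVowel ch then s.2 + 1 else s.2)) (a, v)
    = (a + sB l v, v + (l.countP isVowel : Int)) := by
  induction l generalizing a v with
  | nil => simp [sB]
  | cons ch t ih =>
    simp only [List.foldl_cons, sB, ih, List.countP_cons, Prod.mk.injEq]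
    split_ifs <;> refine ⟨?_, ?_⟩ <;> push_cast <;> ring

lemma sB_shift (l : List Char) (v : Int) : sB l v = v * l.length + sB l 0 := by
  induction l generalizing v with
  | nil => simp [sB]
  | cons ch t ih =>
    simp only [sB, List.length_cons]
    split_ifs with h
    · rw [ih (v + 1), ih (0 + 1)]; push_cast; ring
    · rw [ih v]; push_cast; ring

lemma sA_append (xs ys : List Char) (c : Int) :
    sA (xs ++ ys) c = sA xs c + sA ys (c + xs.length) := by
  induction xs generalizing c with
  | nil => simp [sA]
  | cons ch t ih =>
    simp only [List.cons_append, sA, ih, List.length_cons]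
    push_cast; ring

lemma sA_reverse_eq_sB (l : List Char) : sA l.reverse 0 = sB l 0 := by
  induction l with
  | nil => rfl
  | cons ch t ih =>
    rw [List.reverse_cons, sA_append, ih]
    simp only [sA, sB, List.length_reverse]
    split_ifs with h
    · rw [sB_shift t (0 + 1)]; push_cast; ring
    · push_cast; ring

theorem solve_eq_alt (A : String) : solve A = solve_alt A := by
  have hof : PySem.Set.ofList "AEIOU".toList = "AEIOU".toList := by decide
  unfold solve solve_alt
  dsimp only
  simp only [hof]
  set l := PySem.Chars.upper A.toList with hl
  have hrange : PySem.List.pyRange ((l.length : Int) - 1) (-1) (-1)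
      = (PySem.List.pyRange 0 (l.length : Int) 1).reverse := by
    rw [PySem.List.pyRange_neg_one_eq_reverse]
    norm_num
  have hmap : ((PySem.List.pyRange 0 (l.length : Int) 1).reverse.map
      (fun i => PySem.List.pyGetD l i ' ')) = l.reverse := by
    rw [List.map_reverse, PySem.List.map_pyGetD_pyRange_zero']
  have hfold :
      ((PySem.List.pyRange 0 (l.length : Int) 1).reverse.foldl
        (fun (s : Int × Int) i =>
          (if "AEIOU".toList.contains (PySem.List.pyGetD l i ' ') then s.1 + (s.2 + 1) else s.1,
            s.2 + 1)) ((0 : Int), (0 : Int)))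
      = l.reverse.foldl (fun (s : Int × Int) ch =>
          (if isVowel ch then s.1 + (s.2 + 1) else s.1, s.2 + 1)) (0, 0) := by
    rw [← hmap, List.foldl_map]
    rfl
  have hB :
      (l.foldl (fun (s : Int × Int) ch =>
        (s.1 + (if PySem.Set.contains "AEIOU".toList ch then s.2 + 1 else s.2),
          if PySem.Set.contains "AEIOU".toList ch then s.2 + 1 else s.2)) ((0 : Int), (0 : Int)))
      = l.foldl (fun (s : Int × Int) ch =>
          (s.1 + (if isVowel ch then s.2 + 1 else s.2), if isVowel ch then s.2 + 1 else s.2)) (0, 0) :=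
    rfl
  rw [hrange, hfold, foldA, hB, foldB]
  simp [sA_reverse_eq_sB]

-- ===== VERDICT (by name: the statement is the Claim_ definition above) =====
theorem solve_spec : Claim_equal_solve := by
  intro A _
  unfold Spec_solve
  exact solve_eq_alt A
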